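-- pv_equiv track=rewrite | github.com/iaderdor/advent-of-code-18 | 02/02.py | repetition_box_char
-- ===== SOURCE A (Python) =====
-- def repetition_box_char(box):
--     repetition_counter = dict()
--     double_rep = False
--     triple_rep = False
--
--     for char in box:
--         if (not bool(repetition_counter) or char not in repetition_counter):
--             repetition_counter.update({char:int(1)})
--         else:
--             repetition_counter[char] += 1
--
--
--     for char, value in repetition_counter.items():
--         if ( value == 2 ):
--             double_rep = True
--         elif ( value == 3):
--             triple_rep = True
--
--     return [double_rep, triple_rep]
-- ===== SOURCE B (Python) =====
-- def repetition_box_char(box):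
--     # Sort the characters, then scan consecutive equal runs, tracking the
--     # current run's character and length; structurally different from the
--     # dictionary-counting original.
--     s = sorted(box)
--     double_rep = False
--     triple_rep = False
--     if not s:
--         return [False, False]
--     cur = s[0]
--     cnt = 1
--     for c in s[1:]:
--         if c == cur:
--             cnt += 1
--         else:
--             if cnt == 2:
--                 double_rep = True
--             elif cnt == 3:
--                 triple_rep = True
--             cur = c
--             cnt = 1
--     if cnt == 2:
--         double_rep = True
--     elif cnt == 3:
--         triple_rep = True
--     return [double_rep, triple_rep]
-- ===== Notes on version B (the rewrite author's own statement) =====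
-- stated objective: alternative
-- what changed: Replaces A's dictionary frequency table plus a second pass over its items with a sort-then-scan over consecutive equal runs, maintaining the run length of the current character.
import Mathlib
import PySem

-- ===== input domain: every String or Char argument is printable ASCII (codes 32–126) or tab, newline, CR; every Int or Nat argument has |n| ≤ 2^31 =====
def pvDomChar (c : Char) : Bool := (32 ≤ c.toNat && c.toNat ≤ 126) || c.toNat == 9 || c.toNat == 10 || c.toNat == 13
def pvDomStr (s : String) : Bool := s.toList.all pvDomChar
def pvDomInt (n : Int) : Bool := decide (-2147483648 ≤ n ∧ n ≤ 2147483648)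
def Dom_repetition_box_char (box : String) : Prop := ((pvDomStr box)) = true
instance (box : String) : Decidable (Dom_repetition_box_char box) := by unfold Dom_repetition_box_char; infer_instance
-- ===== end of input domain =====

-- B replaces A's dictionary frequency table with a sort-then-scan over consecutive
-- equal runs (objective: alternative algorithm of similar cost).

-- ===== PORT A =====
def repetition_box_char (box : String) : List Bool :=
  -- first loop: build the frequency dictionary exactly as A does
  let counter : PySem.Dict Char Int :=
    box.toList.foldl
      (fun d c =>
        if d.size == 0 || !(d.contains c) then d.insert c 1
        else d.modify c 0 (· + 1))   -- repetition_counter[char] += 1 (key is present in this branch)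
      PySem.Dict.empty
  -- second loop: scan the items setting the two flags
  let st :=
    counter.items.foldl
      (fun (st : Bool × Bool) p =>
        if p.2 == 2 then (true, st.2)
        else if p.2 == 3 then (st.1, true)
        else st)
      (false, false)
  [st.1, st.2]

-- ===== PORT B =====
-- the for-loop of Source B over s[1:], carrying (cur, cnt, double_rep, triple_rep);
-- the [] case is the flag update after the loop
def pvAltScan : List Char → Char → Int → Bool → Bool → Bool × Bool
  | [], _, cnt, d, t =>
      if cnt == 2 then (true, t) else if cnt == 3 then (d, true) else (d, t)
  | c :: rest, cur, cnt, d, t =>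
      if c == cur then pvAltScan rest cur (cnt + 1) d t
      else if cnt == 2 then pvAltScan rest c 1 true t
      else if cnt == 3 then pvAltScan rest c 1 d true
      else pvAltScan rest c 1 d t

def repetition_box_char_alt (box : String) : List Bool :=
  match PySem.List.sorted box.toList (fun x => x) false with
  | [] => [false, false]
  | c :: rest =>
      let st := pvAltScan rest c 1 false false
      [st.1, st.2]

-- ===== PRECONDITION & SPEC =====
def Spec_repetition_box_char (box : String) (out : List Bool) : Prop := out = repetition_box_char_alt box
instance (box : String) (out : List Bool) : Decidable (Spec_repetition_box_char box out) := by unfold Spec_repetition_box_char; infer_instance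

-- ===== CLAIM (what is proved, stated in full; the proofs are below) =====
def Claim_equal_repetition_box_char : Prop := ∀ (box : String), Dom_repetition_box_char box → Spec_repetition_box_char box (repetition_box_char box)

-- ===== LEMMAS AND PROOFS =====

-- canonical meaning of both programs' flags: some character occurs exactly m times
def pvHasCount (l : List Char) (m : Int) : Prop := ∃ c ∈ l, (l.count c : Int) = m

def pvHasCountB (l : List Char) (m : Int) : Bool :=
  @decide (pvHasCount l m) (by unfold pvHasCount; infer_instance)

-- ==== A side ====

theorem pvStepA_eq_counter_step (d : PySem.Dict Char Int) (c : Char) :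
    (if d.size == 0 || !(d.contains c) then d.insert c 1 else d.modify c 0 (· + 1))
      = d.modify c 0 (· + 1) := by
  by_cases hc : d.contains c = true
  · have hsz : d.size ≠ 0 := by
      simp only [PySem.Dict.contains, List.any_eq_true] at hc
      obtain ⟨p, hp, -⟩ := hc
      have hne : d.items ≠ [] := List.ne_nil_of_mem hp
      simpa [PySem.Dict.size, List.length_eq_zero_iff] using hne
    simp [hc, hsz]
  · have hc' : d.contains c = false := by simpa using hc
    have hg : d.getD c 0 = 0 := PySem.Dict.getD_of_not_contains d 0 hc'
    show _ = d.insert c (d.getD c 0 + 1)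
    simp [hc', hg]

theorem pvFoldA_eq_counter (l : List Char) :
    l.foldl (fun d c =>
        if d.size == 0 || !(d.contains c) then d.insert c 1
        else d.modify c 0 (· + 1)) PySem.Dict.empty
      = PySem.Dict.counter l := by
  have hf : (fun (d : PySem.Dict Char Int) c =>
      if d.size == 0 || !(d.contains c) then d.insert c 1 else d.modify c 0 (· + 1))
      = (fun d c => d.modify c 0 (· + 1)) :=
    funext fun d => funext fun c => pvStepA_eq_counter_step d c
  rw [hf, PySem.Dict.counter_eq_foldl]

theorem pvFold2_eq (ps : List (Char × Int)) (d t : Bool) :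
    ps.foldl (fun (st : Bool × Bool) p =>
        if p.2 == 2 then (true, st.2)
        else if p.2 == 3 then (st.1, true)
        else st) (d, t)
      = (d || ps.any (fun p => p.2 == 2), t || ps.any (fun p => p.2 == 3)) := by
  induction ps generalizing d t with
  | nil => simp
  | cons p rest ih =>
      simp only [List.foldl_cons, List.any_cons]
      by_cases h2 : p.2 = 2
      · rw [if_pos (by simp [h2]), ih]; simp [h2]
      · by_cases h3 : p.2 = 3
        · rw [if_neg (by simp [h2]), if_pos (by simp [h3]), ih]; simp [h3]
        · have e2 : (p.2 == (2 : Int)) = false := by simpa using h2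
          have e3 : (p.2 == (3 : Int)) = false := by simpa using h3
          rw [if_neg (by simp [h2]), if_neg (by simp [h3]), ih]; simp [e2, e3]

theorem pvAnyCount (l : List Char) (m : Int) :
    ((PySem.Set.ofList l).map (fun k => (k, (l.count k : Int)))).any (fun p => p.2 == m)
      = pvHasCountB l m := by
  simp only [List.any_map]
  unfold pvHasCountB
  rw [Bool.eq_iff_iff, List.any_eq_true]
  simp only [decide_eq_true_iff]
  unfold pvHasCount
  constructor
  · rintro ⟨c, hc, h⟩
    exact ⟨c, (PySem.Set.mem_ofList l c).mp hc, by simpa using h⟩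
  · rintro ⟨c, hc, h⟩
    exact ⟨c, (PySem.Set.mem_ofList l c).mpr hc, by simpa using h⟩

theorem pvA_eq_spec (box : String) :
    repetition_box_char box
      = [pvHasCountB box.toList 2, pvHasCountB box.toList 3] := by
  unfold repetition_box_char
  simp only [pvFoldA_eq_counter, PySem.Dict.items_counter, pvFold2_eq,
    Bool.false_or, pvAnyCount]

-- ==== B side ====

-- flag value computed from the tail once the current run's character is cur with cnt = n
def pvFlag (l : List Char) (cur : Char) (n : Int) (m : Int) : Prop :=
  n + (l.count cur : Int) = m ∨ ∃ x ∈ l, cur < x ∧ (l.count x : Int) = m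

def pvFlagB (l : List Char) (cur : Char) (n : Int) (m : Int) : Bool :=
  @decide (pvFlag l cur n m) (by unfold pvFlag; infer_instance)

theorem pvFlag_cons_self (rest : List Char) (cur : Char) (n m : Int) :
    pvFlag (cur :: rest) cur n m ↔ pvFlag rest cur (n + 1) m := by
  unfold pvFlag
  constructor
  · rintro (h | ⟨x, hx, hlt, hc⟩)
    · left; rw [List.count_cons_self] at h; push_cast at h ⊢; omega
    · rcases List.mem_cons.mp hx with hx | hx
      · exact absurd hlt (by simp [hx])
      · right
        refine ⟨x, hx, hlt, ?_⟩
        rwa [List.count_cons_of_ne (by intro h; rw [h] at hlt; exact lt_irrefl _ hlt)] at hc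
  · rintro (h | ⟨x, hx, hlt, hc⟩)
    · left; rw [List.count_cons_self]; push_cast at h ⊢; omega
    · right
      refine ⟨x, List.mem_cons_of_mem _ hx, hlt, ?_⟩
      rw [List.count_cons_of_ne (by intro h; rw [h] at hlt; exact lt_irrefl _ hlt)]
      exact hc

theorem pvFlag_cons_new (c : Char) (rest : List Char) (cur : Char) (n m : Int)
    (hlt : cur < c) (hcle : ∀ x ∈ rest, c ≤ x) :
    pvFlag (c :: rest) cur n m ↔ (n = m ∨ pvFlag rest c 1 m) := by
  have hnotin : cur ∉ c :: rest := by
    intro h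
    rcases List.mem_cons.mp h with h | h
    · exact lt_irrefl _ (h ▸ hlt)
    · exact absurd (hcle cur h) (not_le.mpr hlt)
  have hcount0 : (c :: rest).count cur = 0 := List.count_eq_zero.mpr hnotin
  unfold pvFlag
  rw [hcount0]
  constructor
  · rintro (h | ⟨x, hx, hxlt, hc⟩)
    · left; omega
    · right
      rcases List.mem_cons.mp hx with hx | hx
      · subst hx
        left; rw [List.count_cons_self] at hc; push_cast at hc ⊢; omega
      · by_cases hxc : x = c
        · subst hxc
          left; rw [List.count_cons_self] at hc; push_cast at hc ⊢; omega
        · right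
          refine ⟨x, hx, lt_of_le_of_ne (hcle x hx) (fun h => hxc h.symm), ?_⟩
          rwa [List.count_cons_of_ne (Ne.symm hxc)] at hc
  · rintro (h | h | ⟨x, hx, hxlt, hc⟩)
    · left; omega
    · right
      refine ⟨c, List.mem_cons_self, hlt, ?_⟩
      rw [List.count_cons_self]; push_cast at h ⊢; omega
    · right
      refine ⟨x, List.mem_cons_of_mem _ hx, lt_trans hlt hxlt, ?_⟩
      rw [List.count_cons_of_ne (by intro h; rw [h] at hxlt; exact lt_irrefl _ hxlt)]
      exact hc

theorem pvAltScan_eq (l : List Char) :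
    ∀ (cur : Char) (n : Int) (d t : Bool),
      l.Pairwise (· ≤ ·) → (∀ x ∈ l, cur ≤ x) →
      pvAltScan l cur n d t = (d || pvFlagB l cur n 2, t || pvFlagB l cur n 3) := by
  induction l with
  | nil =>
      intro cur n d t _ _
      simp only [pvAltScan]
      have hflag : ∀ k m : Int, pvFlagB [] cur k m = decide (k = m) := by
        intro k m
        unfold pvFlagB
        refine decide_eq_decide.mpr ?_
        unfold pvFlag; simp
      by_cases hn2 : n = 2
      · simp [hn2, hflag]
      · by_cases hn3 : n = 3
        · simp [hn3, hflag]
        · simp [hn2, hn3, hflag]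
  | cons c rest ih =>
      intro cur n d t hp hcur
      have hp' : rest.Pairwise (· ≤ ·) := hp.tail
      have hcle : ∀ x ∈ rest, c ≤ x := fun x hx => List.rel_of_pairwise_cons hp hx
      by_cases hceq : c = cur
      · subst hceq
        simp only [pvAltScan, beq_self_eq_true, if_true]
        rw [ih c (n + 1) d t hp' hcle]
        rw [show pvFlagB (c :: rest) c n 2 = pvFlagB rest c (n + 1) 2 from
              decide_eq_decide.mpr (pvFlag_cons_self rest c n 2),
            show pvFlagB (c :: rest) c n 3 = pvFlagB rest c (n + 1) 3 from
              decide_eq_decide.mpr (pvFlag_cons_self rest c n 3)]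
      · have hlt : cur < c := lt_of_le_of_ne (hcur c List.mem_cons_self) (fun h => hceq h.symm)
        have hbne : (c == cur) = false := by simpa using hceq
        have e2 : pvFlagB (c :: rest) cur n 2
            = (decide (n = 2) || pvFlagB rest c 1 2) := by
          rw [Bool.eq_iff_iff]
          simp only [pvFlagB, Bool.or_eq_true, decide_eq_true_iff]
          exact pvFlag_cons_new c rest cur n 2 hlt hcle
        have e3 : pvFlagB (c :: rest) cur n 3
            = (decide (n = 3) || pvFlagB rest c 1 3) := by
          rw [Bool.eq_iff_iff]
          simp only [pvFlagB, Bool.or_eq_true, decide_eq_true_iff]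
          exact pvFlag_cons_new c rest cur n 3 hlt hcle
        simp only [pvAltScan, hbne, Bool.false_eq_true, if_false]
        by_cases h2 : n = 2
        · rw [if_pos (by simp [h2]), ih c 1 true t hp' hcle, e2, e3]
          simp [h2]
        · by_cases h3 : n = 3
          · rw [if_neg (by simp [h2]), if_pos (by simp [h3]), ih c 1 d true hp' hcle, e2, e3]
            simp [h3]
          · rw [if_neg (by simp [h2]), if_neg (by simp [h3]), ih c 1 d t hp' hcle, e2, e3]
            simp [h2, h3]

theorem pvFlag_head (c : Char) (rest : List Char) (m : Int)
    (hcle : ∀ x ∈ rest, c ≤ x) :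
    pvFlag rest c 1 m ↔ pvHasCount (c :: rest) m := by
  unfold pvFlag pvHasCount
  constructor
  · rintro (h | ⟨x, hx, hxlt, hc⟩)
    · refine ⟨c, List.mem_cons_self, ?_⟩
      rw [List.count_cons_self]; push_cast at h ⊢; omega
    · refine ⟨x, List.mem_cons_of_mem _ hx, ?_⟩
      rw [List.count_cons_of_ne (by intro h; rw [h] at hxlt; exact lt_irrefl _ hxlt)]
      exact hc
  · rintro ⟨x, hx, hc⟩
    rcases List.mem_cons.mp hx with hx | hx
    · subst hx
      left; rw [List.count_cons_self] at hc; push_cast at hc ⊢; omega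
    · by_cases hxc : x = c
      · subst hxc
        left; rw [List.count_cons_self] at hc; push_cast at hc ⊢; omega
      · right
        refine ⟨x, hx, lt_of_le_of_ne (hcle x hx) (fun h => hxc h.symm), ?_⟩
        rwa [List.count_cons_of_ne (Ne.symm hxc)] at hc

theorem pvHasCount_perm {s l : List Char} (hperm : s.Perm l) (m : Int) :
    pvHasCount s m ↔ pvHasCount l m := by
  unfold pvHasCount
  constructor
  · rintro ⟨c, hc, h⟩
    exact ⟨c, hperm.mem_iff.mp hc, by rwa [← hperm.count_eq]⟩
  · rintro ⟨c, hc, h⟩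
    exact ⟨c, hperm.mem_iff.mpr hc, by rwa [hperm.count_eq]⟩

theorem pvB_eq_spec (box : String) :
    repetition_box_char_alt box
      = [pvHasCountB box.toList 2, pvHasCountB box.toList 3] := by
  cases hs : PySem.List.sorted box.toList (fun x => x) false with
  | nil =>
      unfold repetition_box_char_alt
      rw [hs]
      have hl : box.toList = [] := (PySem.List.sorted_eq_nil_iff _ _ _).mp hs
      rw [hl]
      have h2 : pvHasCountB ([] : List Char) 2 = false := by
        unfold pvHasCountB; simp [pvHasCount]
      have h3 : pvHasCountB ([] : List Char) 3 = false := by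
        unfold pvHasCountB; simp [pvHasCount]
      simp [h2, h3]
  | cons c rest =>
      have hperm : (c :: rest).Perm box.toList := hs ▸ PySem.List.sorted_perm box.toList _ false
      have hpair : (c :: rest).Pairwise (· ≤ ·) := hs ▸ PySem.List.sorted_pairwise box.toList _
      have hcle : ∀ x ∈ rest, c ≤ x := fun x hx => List.rel_of_pairwise_cons hpair hx
      unfold repetition_box_char_alt
      rw [hs]
      show [(pvAltScan rest c 1 false false).1, (pvAltScan rest c 1 false false).2] = _
      rw [pvAltScan_eq rest c 1 false false hpair.tail hcle]
      simp only [Bool.false_or]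
      rw [show pvFlagB rest c 1 2 = pvHasCountB box.toList 2 from
            decide_eq_decide.mpr ((pvFlag_head c rest 2 hcle).trans (pvHasCount_perm hperm 2)),
          show pvFlagB rest c 1 3 = pvHasCountB box.toList 3 from
            decide_eq_decide.mpr ((pvFlag_head c rest 3 hcle).trans (pvHasCount_perm hperm 3))]

-- ===== VERDICT (by name: the statement is the Claim_ definition above) =====
theorem repetition_box_char_spec : Claim_equal_repetition_box_char := by
  intro box _
  show repetition_box_char box = repetition_box_char_alt box
  rw [pvA_eq_spec, pvB_eq_spec]
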